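-- pv_equiv track=rewrite | github.com/ZScomnet/Programmers | Search/2under_bit.py | solution
-- ===== SOURCE A (Python) =====
-- def solution(numbers):
-- 	answer = []
-- 	for num in numbers:
-- 		n = []
-- 		if num == 0:
-- 			answer.append(1)
-- 			continue
-- 		while num >= 1:
-- 			n.append(num%2)
-- 			num = num // 2
--
-- 		n.append(0)
-- 		for i in range(len(n)-1):
-- 			if i == 0 and n[i] == 0:
-- 				n[0] = 1
-- 				break
-- 			elif n[i] == 1 and n[i+1] == 0:
-- 				n[i] = 0
-- 				n[i+1] = 1
-- 				break
-- 		result = 0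
-- 		for i in range(len(n)):
-- 			result += (2**(i)) * n[i]
-- 		answer.append(result)
--
--
-- 	return answer
-- ===== SOURCE B (Python) =====
-- def solution(numbers):
--     answer = []
--     for num in numbers:
--         if num < 0:
--             # A's convention: numbers below 1 have no binary digits, result 0
--             answer.append(0)
--         elif num % 2 == 0:
--             # lowest bit is 0: flipping it to 1 adds 1 (also maps 0 -> 1)
--             answer.append(num + 1)
--         else:
--             # odd: let 2**t be the largest power of two dividing num + 1
--             # (t = number of trailing 1-bits); the answer is num + 2**(t-1)
--             d, p = num + 1, 1
--             while d % 2 == 0: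
--                 d //= 2
--                 p *= 2
--             answer.append(num + p // 2)
--     return answer
-- ===== Notes on version B (the rewrite author's own statement) =====
-- stated objective: simpler
-- what changed: B drops A's build-bit-list / scan-for-pattern / power-sum-reconstruct pipeline and computes each element arithmetically: num+1 for even num (and 1 for 0), num + p//2 for odd num where p is the largest power of two dividing num+1 (equivalently 2^(number of trailing 1-bits)); negative numbers keep A's value 0 (they have no binary digits here).
import Mathlib
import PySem

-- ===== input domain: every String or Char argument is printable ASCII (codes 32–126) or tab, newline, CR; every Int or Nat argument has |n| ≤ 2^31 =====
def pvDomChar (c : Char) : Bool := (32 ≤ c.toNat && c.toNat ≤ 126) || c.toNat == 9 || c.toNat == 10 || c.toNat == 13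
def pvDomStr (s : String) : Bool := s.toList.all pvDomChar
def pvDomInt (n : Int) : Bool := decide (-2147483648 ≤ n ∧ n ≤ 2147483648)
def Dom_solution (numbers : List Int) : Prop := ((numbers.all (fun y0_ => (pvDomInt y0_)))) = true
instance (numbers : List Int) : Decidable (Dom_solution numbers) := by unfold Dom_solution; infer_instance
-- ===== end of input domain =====

-- B replaces A's build-bit-list / scan-pattern / power-sum-reconstruct pipeline with a direct
-- per-element arithmetic computation (objective: simpler); return values agree on every input.

-- ===== PORT A =====
-- while num >= 1: n.append(num % 2); num = num // 2
def bitsA (num : Int) : List Int :=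
  if _h : 1 ≤ num then PySem.Int.mod num 2 :: bitsA (PySem.Int.floordiv num 2) else []
termination_by num.toNat
decreasing_by
  rw [PySem.Int.floordiv_eq_ediv_of_pos (by omega)]
  omega

-- the 'for i in range(len(n)-1)' scan at positions i >= 0 checking n[i]==1 and n[i+1]==0
def scanFix : List Int → List Int
  | x :: y :: t => if x = 1 ∧ y = 0 then 0 :: 1 :: t else x :: scanFix (y :: t)
  | l => l

-- the scan including its special first-iteration case (i == 0 and n[0] == 0);
-- the loop body runs only when the list has at least two elements (range(len(n)-1))
def fixA : List Int → List Int
  | a :: b :: t => if a = 0 then 1 :: b :: t else scanFix (a :: b :: t)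
  | l => l

-- result = sum over i of 2**i * n[i]
def valA : List Int → Nat → Int
  | [], _ => 0
  | b :: t, i => 2 ^ i * b + valA t (i + 1)

def solution (numbers : List Int) : List Int :=
  numbers.foldl (fun answer num =>
    if num = 0 then answer ++ [1]
    else answer ++ [valA (fixA (bitsA num ++ [0])) 0]) []

-- ===== PORT B =====
-- while d % 2 == 0: d //= 2; p *= 2   ('0 < d' is a totality guard only: the loop is
-- reached with d = num + 1 >= 2, where it matches Python exactly)
def twoValB (d p : Int) : Int × Int :=
  if _h : 0 < d ∧ PySem.Int.mod d 2 = 0 then twoValB (PySem.Int.floordiv d 2) (p * 2)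
  else (d, p)
termination_by d.toNat
decreasing_by
  rw [PySem.Int.floordiv_eq_ediv_of_pos (by omega)]
  omega

def solution_alt (numbers : List Int) : List Int :=
  numbers.foldl (fun answer num =>
    if num < 0 then answer ++ [0]
    else if PySem.Int.mod num 2 = 0 then answer ++ [num + 1]
    else answer ++ [num + PySem.Int.floordiv (twoValB (num + 1) 1).2 2]) []

-- ===== PRECONDITION & SPEC =====
def Spec_solution (numbers : List Int) (out : List Int) : Prop := out = solution_alt numbers
instance (numbers : List Int) (out : List Int) : Decidable (Spec_solution numbers out) := by unfold Spec_solution; infer_instance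

-- ===== CLAIM (what is proved, stated in full; the proofs are below) =====
def Claim_equal_solution : Prop := ∀ (numbers : List Int), Dom_solution numbers → Spec_solution numbers (solution numbers)

-- ===== LEMMAS AND PROOFS =====

lemma valA_shift (l : List Int) : ∀ i : Nat, valA l (i + 1) = 2 * valA l i := by
  induction l with
  | nil => intro i; simp [valA]
  | cons b t ih =>
      intro i
      simp only [valA, ih (i + 1), pow_succ]
      ring

lemma bitsA_pos (num : Int) (h : 1 ≤ num) :
    bitsA num = PySem.Int.mod num 2 :: bitsA (PySem.Int.floordiv num 2) := by
  rw [bitsA]; simp [h]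

lemma bitsA_nonpos (num : Int) (h : num < 1) : bitsA num = [] := by
  rw [bitsA]; simp [show ¬ (1 ≤ num) by omega]

lemma bits_val : ∀ (N : Nat) (m : Int), m.toNat ≤ N → 0 ≤ m →
    valA (bitsA m ++ [0]) 0 = m := by
  intro N
  induction N with
  | zero =>
      intro m hle h0
      have hm : m = 0 := by omega
      subst hm
      simp [bitsA_nonpos 0 (by omega), valA]
  | succ N ih =>
      intro m hle h0
      by_cases h1 : 1 ≤ m
      · rw [bitsA_pos m h1]
        rw [PySem.Int.mod_eq_emod_of_pos (by omega), PySem.Int.floordiv_eq_ediv_of_pos (by omega)]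
        have hrec := ih (m / 2) (by omega) (by omega)
        simp only [List.cons_append, valA, pow_zero, one_mul, valA_shift, hrec]
        omega
      · have hm : m = 0 := by omega
        subst hm
        simp [bitsA_nonpos 0 (by omega), valA]

lemma twoValB_snd_double : ∀ (N : Nat) (d p : Int), d.toNat ≤ N →
    (twoValB d (2 * p)).2 = 2 * (twoValB d p).2 := by
  intro N
  induction N with
  | zero =>
      intro d p hle
      have hc : ¬ (0 < d ∧ PySem.Int.mod d 2 = 0) := by
        rintro ⟨h0, _⟩; omega
      conv_lhs => rw [twoValB]
      conv_rhs => rw [twoValB]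
      rw [dif_neg hc, dif_neg hc]
  | succ N ih =>
      intro d p hle
      by_cases hc : 0 < d ∧ PySem.Int.mod d 2 = 0
      · have hlt : (PySem.Int.floordiv d 2).toNat ≤ N := by
          rw [PySem.Int.floordiv_eq_ediv_of_pos (by omega)]
          omega
        conv_lhs => rw [twoValB]
        conv_rhs => rw [twoValB]
        rw [dif_pos hc, dif_pos hc, show 2 * p * 2 = 2 * (p * 2) by ring]
        exact ih _ _ hlt
      · conv_lhs => rw [twoValB]
        conv_rhs => rw [twoValB]
        rw [dif_neg hc, dif_neg hc]

-- per-element value of B's odd branch, stated for the pipeline of A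
lemma twoValB_step (d p : Int) (h0 : 0 < d) (he : d % 2 = 0) :
    twoValB d p = twoValB (d / 2) (p * 2) := by
  conv_lhs => rw [twoValB]
  rw [dif_pos ⟨h0, by rw [PySem.Int.mod_eq_emod_of_pos (by omega)]; exact he⟩,
    PySem.Int.floordiv_eq_ediv_of_pos (by omega)]

lemma twoValB_stop (d p : Int) (he : ¬ d % 2 = 0) : twoValB d p = (d, p) := by
  conv_lhs => rw [twoValB]
  rw [dif_neg]
  rintro ⟨h0, hm⟩
  rw [PySem.Int.mod_eq_emod_of_pos (by omega)] at hm
  exact he hm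

lemma scanFix_cons_cons (x y : Int) (t : List Int) :
    scanFix (x :: y :: t) = if x = 1 ∧ y = 0 then 0 :: 1 :: t else x :: scanFix (y :: t) := by
  rw [scanFix]

lemma fixA_cons_cons (a b : Int) (t : List Int) :
    fixA (a :: b :: t) = if a = 0 then 1 :: b :: t else scanFix (a :: b :: t) := by
  rw [fixA]

lemma pipeline_eq : ∀ (N : Nat) (num : Int), num.toNat ≤ N → 1 ≤ num →
    valA (fixA (bitsA num ++ [0])) 0 =
      (if PySem.Int.mod num 2 = 0 then num + 1
       else num + PySem.Int.floordiv (twoValB (num + 1) 1).2 2) := by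
  intro N
  induction N with
  | zero => intro num hle h1; omega
  | succ N ih =>
    intro num hle h1
    have hmod : PySem.Int.mod num 2 = num % 2 := PySem.Int.mod_eq_emod_of_pos (by omega)
    have hbits : bitsA num = num % 2 :: bitsA (num / 2) := by
      rw [bitsA_pos num h1, hmod, PySem.Int.floordiv_eq_ediv_of_pos (by omega)]
    by_cases hev : num % 2 = 0
    · -- even num: the lowest bit is 0 and is flipped to 1, giving num + 1
      have hk1 : 1 ≤ num / 2 := by omega
      have hbk : bitsA (num / 2) =
          PySem.Int.mod (num / 2) 2 :: bitsA (PySem.Int.floordiv (num / 2) 2) :=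
        bitsA_pos _ hk1
      have hv : valA (bitsA (num / 2) ++ [0]) 0 = num / 2 :=
        bits_val N _ (by omega) (by omega)
      rw [hbits, hev, hbk, List.cons_append, List.cons_append, fixA_cons_cons,
        if_pos rfl, ← List.cons_append, ← hbk, hmod, if_pos hev]
      simp only [valA, valA_shift, pow_zero, one_mul]
      omega
    · -- odd num
      have hodd : num % 2 = 1 := by omega
      rw [hmod, hodd]
      simp only [one_ne_zero, if_false]
      by_cases hkp : (num / 2) % 2 = 0
      · -- num = 4j + 1: one trailing 1-bit, the pattern is found at i = 0
        -- head of bitsA (num/2) ++ [0] is 0 (it is [0] when num = 1)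
        obtain ⟨t, ht⟩ : ∃ t, bitsA (num / 2) ++ [0] = 0 :: t := by
          by_cases hk1 : 1 ≤ num / 2
          · exact ⟨_, by rw [bitsA_pos _ hk1, PySem.Int.mod_eq_emod_of_pos (by omega), hkp,
              List.cons_append]⟩
          · exact ⟨[], by rw [bitsA_nonpos _ (by omega)]; rfl⟩
        have hv0 : valA (0 :: t) 0 = num / 2 := by
          rw [← ht]; exact bits_val N _ (by omega) (by omega)
        have hvt : 2 * valA t 0 = num / 2 := by
          simp only [valA, valA_shift, pow_zero, mul_zero, zero_add] at hv0
          omega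
        have hs : (twoValB (num + 1) 1).2 = 2 := by
          rw [twoValB_step _ _ (by omega) (by omega),
            twoValB_stop _ _ (by omega)]
          norm_num
        rw [hbits, hodd, List.cons_append, ht, hs,
          PySem.Int.floordiv_eq_ediv_of_pos (a := 2) (by omega)]
        simp only [fixA, one_ne_zero, if_false, scanFix, and_self, if_pos]
        simp only [valA, valA_shift, pow_zero, one_mul] at *
        omega
      · -- num = 4j + 3: recurse on num / 2 (also odd)
        have hkodd : (num / 2) % 2 = 1 := by omega
        have hk1 : 1 ≤ num / 2 := by omega
        have hbk : bitsA (num / 2) = 1 :: bitsA (num / 2 / 2) := by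
          rw [bitsA_pos _ hk1, PySem.Int.mod_eq_emod_of_pos (by omega), hkodd,
            PySem.Int.floordiv_eq_ediv_of_pos (by omega)]
        obtain ⟨c, t, hct⟩ : ∃ c t, bitsA (num / 2 / 2) ++ [0] = c :: t := by
          cases h : bitsA (num / 2 / 2) ++ [0] with
          | nil => exact absurd h (by simp)
          | cons c t => exact ⟨c, t, rfl⟩
        have hih := ih (num / 2) (by omega) hk1
        rw [PySem.Int.mod_eq_emod_of_pos (b := 2) (by omega), hkodd] at hih
        simp only [one_ne_zero, if_false] at hih
        -- value of the recursive pipeline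
        have hfk : fixA (bitsA (num / 2) ++ [0]) = scanFix (bitsA (num / 2) ++ [0]) := by
          rw [hbk, List.cons_append, hct]
          simp [fixA]
        -- unfold twoValB on num + 1 = 2 * (num/2 + 1) and on num/2 + 1 (both even)
        have h1s : twoValB (num + 1) 1 = twoValB (num / 2 + 1) 2 := by
          rw [twoValB_step _ _ (by omega) (by omega)]
          norm_num
          congr 1
          omega
        have h2s : (twoValB (num / 2 + 1) 2).2 = 2 * (twoValB (num / 2 + 1) 1).2 := by
          rw [show (2 : Int) = 2 * 1 by norm_num]
          exact twoValB_snd_double (num / 2 + 1).toNat _ _ le_rfl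
        obtain ⟨s, hs⟩ : ∃ s, (twoValB (num / 2 + 1) 1).2 = 2 * s := by
          rw [twoValB_step _ _ (by omega) (by omega),
            show (1 : Int) * 2 = 2 * 1 by norm_num,
            twoValB_snd_double (num / 2 + 1 / 2).toNat _ _ (by omega)]
          exact ⟨_, rfl⟩
        rw [hs, PySem.Int.floordiv_eq_ediv_of_pos (by omega),
          show 2 * s / 2 = s by omega] at hih
        have hl : bitsA (num / 2) ++ [0] = 1 :: c :: t := by
          rw [hbk, List.cons_append, hct]
        rw [hbits, hodd, List.cons_append, hl, fixA_cons_cons, if_neg (by norm_num),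
          scanFix_cons_cons, if_neg (by norm_num),
          show scanFix (1 :: c :: t) = fixA (bitsA (num / 2) ++ [0]) from by rw [hfk, hl]]
        simp only [valA, valA_shift, pow_zero, one_mul]
        rw [hih, h1s, h2s, hs, PySem.Int.floordiv_eq_ediv_of_pos (by omega)]
        omega

-- per-element agreement of the two fold bodies
lemma elem_eq (num : Int) :
    (if num = 0 then (1 : Int) else valA (fixA (bitsA num ++ [0])) 0) =
      (if num < 0 then 0
       else if PySem.Int.mod num 2 = 0 then num + 1
       else num + PySem.Int.floordiv (twoValB (num + 1) 1).2 2) := by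
  by_cases h0 : num = 0
  · subst h0
    norm_num [PySem.Int.mod_eq_emod_of_pos]
  · by_cases hneg : num < 0
    · rw [if_neg h0, if_pos hneg]
      rw [bitsA_nonpos num (by omega)]
      simp [valA, fixA]
    · have h1 : 1 ≤ num := by omega
      rw [if_neg h0, if_neg hneg, pipeline_eq num.toNat num le_rfl h1]

lemma fold_eq (numbers : List Int) : ∀ acc : List Int,
    numbers.foldl (fun answer num =>
      if num = 0 then answer ++ [1]
      else answer ++ [valA (fixA (bitsA num ++ [0])) 0]) acc =
    numbers.foldl (fun answer num =>
      if num < 0 then answer ++ [0]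
      else if PySem.Int.mod num 2 = 0 then answer ++ [num + 1]
      else answer ++ [num + PySem.Int.floordiv (twoValB (num + 1) 1).2 2]) acc := by
  induction numbers with
  | nil => intro acc; rfl
  | cons x xs ih =>
      intro acc
      simp only [List.foldl_cons]
      rw [show (if x = 0 then acc ++ [(1 : Int)] else acc ++ [valA (fixA (bitsA x ++ [0])) 0]) =
            acc ++ [if x = 0 then (1 : Int) else valA (fixA (bitsA x ++ [0])) 0] from by
          split_ifs <;> rfl,
        show (if x < 0 then acc ++ [(0 : Int)]
              else if PySem.Int.mod x 2 = 0 then acc ++ [x + 1]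
              else acc ++ [x + PySem.Int.floordiv (twoValB (x + 1) 1).2 2]) =
            acc ++ [if x < 0 then (0 : Int)
              else if PySem.Int.mod x 2 = 0 then x + 1
              else x + PySem.Int.floordiv (twoValB (x + 1) 1).2 2] from by
          split_ifs <;> rfl,
        elem_eq x]
      exact ih _

-- ===== VERDICT (by name: the statement is the Claim_ definition above) =====
theorem solution_spec : Claim_equal_solution := by
  intro numbers _
  unfold Spec_solution solution solution_alt
  exact fold_eq numbers []
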